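-- pv_equiv track=rewrite | github.com/ABelonovskii/OptoTransformerVCSELParamPredictor | src/data/generate_data_embeddings.py | expand_embeddings
-- ===== SOURCE A (Python) =====
-- def expand_embeddings(src, max_size=31):
--     """
--     A temporary solution to generalize the processing of different kinds of VCSEL structures:
--      - Single layer
--      - DBR
--      - VCSEL
--     """
--     seq_len, emb_size = len(src), len(src[0])
--     expanded_data = [[0] * emb_size for _ in range(max_size)]
--
--     if seq_len == 8:
--         fill_indices = {0: 0, 1: 1, 2: 2, 3: 16, 4: 17, 5: 18, 6: 29, 7: 30}
--     elif seq_len == 12: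
--         fill_indices = {i: i for i in range(10)}
--         fill_indices.update({10: 29, 11: 30})
--     else:
--         return src
--
--     for src_idx, target_idx in fill_indices.items():
--         expanded_data[target_idx] = src[src_idx]
--
--     return expanded_data
-- ===== SOURCE B (Python) =====
-- def expand_embeddings(src, max_size=31):
--     # Block concatenation: stitch fixed slices of src with runs of zero rows;
--     # no index map and no pre-allocated matrix to scatter into.
--     seq_len = len(src)
--
--     def zeros(k):
--         return [[0] * len(src[0]) for _ in range(k)]
--
--     if seq_len == 8:
--         return src[:3] + zeros(13) + src[3:6] + zeros(10) + src[6:] + zeros(max_size - 31)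
--     if seq_len == 12:
--         return src[:10] + zeros(19) + src[10:] + zeros(max_size - 31)
--     return src
-- ===== Notes on version B (the rewrite author's own statement) =====
-- stated objective: faster
-- what changed: B builds the result by concatenating contiguous slices of src with runs of fresh zero rows (src[:3]+zeros(13)+src[3:6]+zeros(10)+src[6:]+zeros(max_size-31), analogously for length 12), eliminating the index-map dictionary and the pre-allocated max_size-row zero matrix that A always builds and scatters into -- in particular A allocates that matrix even on the early-return path for other lengths, where B allocates nothing.
-- outside the precondition, e.g. on expand_embeddings([], 31): A raises IndexError, B returns []
import Mathlib
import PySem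

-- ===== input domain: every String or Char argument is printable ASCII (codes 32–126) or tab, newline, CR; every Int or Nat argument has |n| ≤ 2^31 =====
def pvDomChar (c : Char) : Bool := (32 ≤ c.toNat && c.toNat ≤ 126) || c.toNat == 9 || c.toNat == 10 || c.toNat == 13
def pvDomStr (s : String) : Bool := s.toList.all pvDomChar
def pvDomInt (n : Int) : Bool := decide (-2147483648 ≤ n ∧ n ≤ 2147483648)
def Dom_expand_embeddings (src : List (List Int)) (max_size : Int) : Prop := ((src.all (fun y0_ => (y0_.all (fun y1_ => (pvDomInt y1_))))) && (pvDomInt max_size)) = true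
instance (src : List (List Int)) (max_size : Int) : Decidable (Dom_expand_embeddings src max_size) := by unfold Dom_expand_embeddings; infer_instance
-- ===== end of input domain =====

-- B builds each output as a concatenation of contiguous src slices and runs of fresh zero rows,
-- with no index map and no pre-allocated matrix (alternative decomposition; return-value equivalence).


-- ===== PORT A =====
-- fill_indices for seq_len == 8, as (src_idx, target_idx) pairs in dict insertion order
def pvFill8 : List (Int × Int) := [(0, 0), (1, 1), (2, 2), (3, 16), (4, 17), (5, 18), (6, 29), (7, 30)]
-- {i: i for i in range(10)} then .update({10: 29, 11: 30}) — new keys append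
def pvFill12 : List (Int × Int) := (PySem.List.pyRange 0 10 1).map (fun i => (i, i)) ++ [(10, 29), (11, 30)]

def expand_embeddings (src : List (List Int)) (max_size : Int) : List (List Int) :=
  let emb_size := (PySem.List.pyGetD src 0 []).length
  let expanded_data := (PySem.List.pyRange 0 max_size 1).map (fun _ => List.replicate emb_size (0 : Int))
  if (src.length : Int) = 8 then
    pvFill8.foldl (fun acc p => PySem.List.pySetD acc p.2 (PySem.List.pyGetD src p.1 [])) expanded_data
  else if (src.length : Int) = 12 then
    pvFill12.foldl (fun acc p => PySem.List.pySetD acc p.2 (PySem.List.pyGetD src p.1 [])) expanded_data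
  else src

-- ===== PORT B =====
-- zeros(k) = [[0]*len(src[0]) for _ in range(k)]
def pvZerosB (src : List (List Int)) (k : Int) : List (List Int) :=
  (PySem.List.pyRange 0 k 1).map (fun _ => List.replicate (PySem.List.pyGetD src 0 []).length (0 : Int))

def expand_embeddings_alt (src : List (List Int)) (max_size : Int) : List (List Int) :=
  if (src.length : Int) = 8 then
    PySem.List.slice src none (some 3) ++ pvZerosB src 13 ++
    PySem.List.slice src (some 3) (some 6) ++ pvZerosB src 10 ++
    PySem.List.slice src (some 6) none ++ pvZerosB src (max_size - 31)
  else if (src.length : Int) = 12 then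
    PySem.List.slice src none (some 10) ++ pvZerosB src 19 ++
    PySem.List.slice src (some 10) none ++ pvZerosB src (max_size - 31)
  else src

-- ===== PRECONDITION & SPEC =====
-- Pre_ excludes exactly the inputs where A raises: src = [] (len(src[0]) → IndexError), and
-- seq_len ∈ {8, 12} with max_size < 31 (scatter into the too-short zero matrix → IndexError).
def Pre_expand_embeddings (src : List (List Int)) (max_size : Int) : Prop :=
  src ≠ [] ∧ ((src.length = 8 ∨ src.length = 12) → 31 ≤ max_size)
instance (src : List (List Int)) (max_size : Int) : Decidable (Pre_expand_embeddings src max_size) := by unfold Pre_expand_embeddings; infer_instance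

def pvWitness_expand_embeddings : List (List Int) × Int :=
  ([[1], [2], [3], [4], [5], [6], [7], [8]], 31)

def Spec_expand_embeddings (src : List (List Int)) (max_size : Int) (out : List (List Int)) : Prop := out = expand_embeddings_alt src max_size
instance (src : List (List Int)) (max_size : Int) (out : List (List Int)) : Decidable (Spec_expand_embeddings src max_size out) := by unfold Spec_expand_embeddings; infer_instance

-- ===== CLAIM (what is proved, stated in full; the proofs are below) =====
def Claim_equal_expand_embeddings : Prop := ∀ (src : List (List Int)) (max_size : Int), Dom_expand_embeddings src max_size → Pre_expand_embeddings src max_size → Spec_expand_embeddings src max_size (expand_embeddings src max_size)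

-- ===== LEMMAS AND PROOFS =====

lemma set_map_range {α : Type} (f : Nat → α) (n j : Nat) (v : α) (_hj : j < n) :
    ((List.range n).map f).set j v = (List.range n).map (fun k => if k = j then v else f k) := by
  apply List.ext_getElem
  · simp
  · intro k hk1 hk2
    simp only [List.length_set, List.length_map, List.length_range] at hk1
    simp only [List.getElem_set, List.getElem_map, List.getElem_range]
    by_cases hkj : j = k
    · subst hkj; simp
    · rw [if_neg hkj, if_neg (by omega)]

lemma caseOther (src : List (List Int)) (M : Int) (h8 : src.length ≠ 8) (h12 : src.length ≠ 12) :
    expand_embeddings src M = expand_embeddings_alt src M := by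
  have c8 : ¬ ((src.length : Int) = 8) := by exact_mod_cast h8
  have c12 : ¬ ((src.length : Int) = 12) := by exact_mod_cast h12
  simp only [expand_embeddings, expand_embeddings_alt, c8, c12, if_false]

set_option maxHeartbeats 2000000 in
lemma case8 (src : List (List Int)) (M : Int) (h : src.length = 8) (hM : 31 ≤ M) :
    expand_embeddings src M = expand_embeddings_alt src M := by
  match src, h with
  | [a0,a1,a2,a3,a4,a5,a6,a7], _ =>
  simp only [expand_embeddings, expand_embeddings_alt]
  rw [if_pos (by simp : (([a0,a1,a2,a3,a4,a5,a6,a7] : List (List Int)).length : Int) = 8),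
      if_pos (by simp : (([a0,a1,a2,a3,a4,a5,a6,a7] : List (List Int)).length : Int) = 8)]
  rw [PySem.List.pyRange_one]
  simp only [sub_zero, zero_add]
  simp only [pvFill8, List.foldl_cons, List.foldl_nil, pvZerosB]
  rw [show PySem.List.pyGetD [a0,a1,a2,a3,a4,a5,a6,a7] (0:Int) [] = a0 from by simp [PySem.List.pyGetD, PySem.List.pyGet?, PySem.List.pyIdx?],
      show PySem.List.pyGetD [a0,a1,a2,a3,a4,a5,a6,a7] (1:Int) [] = a1 from by simp [PySem.List.pyGetD, PySem.List.pyGet?, PySem.List.pyIdx?],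
      show PySem.List.pyGetD [a0,a1,a2,a3,a4,a5,a6,a7] (2:Int) [] = a2 from by simp [PySem.List.pyGetD, PySem.List.pyGet?, PySem.List.pyIdx?],
      show PySem.List.pyGetD [a0,a1,a2,a3,a4,a5,a6,a7] (3:Int) [] = a3 from by simp [PySem.List.pyGetD, PySem.List.pyGet?, PySem.List.pyIdx?],
      show PySem.List.pyGetD [a0,a1,a2,a3,a4,a5,a6,a7] (4:Int) [] = a4 from by simp [PySem.List.pyGetD, PySem.List.pyGet?, PySem.List.pyIdx?],
      show PySem.List.pyGetD [a0,a1,a2,a3,a4,a5,a6,a7] (5:Int) [] = a5 from by simp [PySem.List.pyGetD, PySem.List.pyGet?, PySem.List.pyIdx?],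
      show PySem.List.pyGetD [a0,a1,a2,a3,a4,a5,a6,a7] (6:Int) [] = a6 from by simp [PySem.List.pyGetD, PySem.List.pyGet?, PySem.List.pyIdx?],
      show PySem.List.pyGetD [a0,a1,a2,a3,a4,a5,a6,a7] (7:Int) [] = a7 from by simp [PySem.List.pyGetD, PySem.List.pyGet?, PySem.List.pyIdx?]]
  set z : List Int := List.replicate a0.length (0:Int) with hz
  rw [List.map_map]
  simp only [PySem.List.pySetD_of_nonneg _ _ (by norm_num : (0:Int) <= 0),
    PySem.List.pySetD_of_nonneg _ _ (by norm_num : (0:Int) <= 1),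
    PySem.List.pySetD_of_nonneg _ _ (by norm_num : (0:Int) <= 2),
    PySem.List.pySetD_of_nonneg _ _ (by norm_num : (0:Int) <= 16),
    PySem.List.pySetD_of_nonneg _ _ (by norm_num : (0:Int) <= 17),
    PySem.List.pySetD_of_nonneg _ _ (by norm_num : (0:Int) <= 18),
    PySem.List.pySetD_of_nonneg _ _ (by norm_num : (0:Int) <= 29),
    PySem.List.pySetD_of_nonneg _ _ (by norm_num : (0:Int) <= 30)]
  rw [set_map_range _ _ _ _ (by omega)]
  rw [set_map_range _ _ _ _ (by omega)]
  rw [set_map_range _ _ _ _ (by omega)]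
  rw [set_map_range _ _ _ _ (by omega)]
  rw [set_map_range _ _ _ _ (by omega)]
  rw [set_map_range _ _ _ _ (by omega)]
  rw [set_map_range _ _ _ _ (by omega)]
  rw [set_map_range _ _ _ _ (by omega)]
  rw [show PySem.List.slice [a0,a1,a2,a3,a4,a5,a6,a7] none (some 3) = [a0,a1,a2] from by rw [PySem.List.slice_to]; rfl; norm_num,
      show PySem.List.slice [a0,a1,a2,a3,a4,a5,a6,a7] (some 3) (some 6) = [a3,a4,a5] from by rw [PySem.List.slice_toNat]; rfl; norm_num; norm_num,
      show PySem.List.slice [a0,a1,a2,a3,a4,a5,a6,a7] (some 6) none = [a6,a7] from by rw [PySem.List.slice_from]; rfl; norm_num]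
  rw [show PySem.List.pyRange 0 13 1 = (List.range 13).map (fun k : Nat => (k : Int)) from by rw [PySem.List.pyRange_one]; simp,
      show PySem.List.pyRange 0 10 1 = (List.range 10).map (fun k : Nat => (k : Int)) from by rw [PySem.List.pyRange_one]; simp,
      show PySem.List.pyRange 0 (M-31) 1 = (List.range (M.toNat - 31)).map (fun k : Nat => (k : Int)) from by rw [PySem.List.pyRange_one, show (M-31-0).toNat = M.toNat - 31 from by omega]; simp]
  simp only [List.map_map]
  obtain ⟨m, hm⟩ : ∃ m, M.toNat = 31 + m := ⟨M.toNat - 31, by omega⟩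
  rw [hm, show 31 + m - 31 = m from by omega, List.range_add, List.map_append, List.map_map]
  have htail : (List.range m).map ((fun k : Nat =>
      if k = Int.toNat 30 then a7 else if k = Int.toNat 29 then a6 else if k = Int.toNat 18 then a5
      else if k = Int.toNat 17 then a4 else if k = Int.toNat 16 then a3 else if k = Int.toNat 2 then a2
      else if k = Int.toNat 1 then a1 else if k = Int.toNat 0 then a0 else ((fun _ : Int => z) ∘ fun k : Nat => (k : Int)) k) ∘ (fun k => 31 + k))
      = (List.range m).map (fun _ => z) := by
    apply List.map_congr_left
    intro k _
    simp only [Function.comp_apply]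
    rw [if_neg (by omega), if_neg (by omega), if_neg (by omega), if_neg (by omega),
        if_neg (by omega), if_neg (by omega), if_neg (by omega), if_neg (by omega)]
  rw [htail]
  rw [show List.range 31 = [0,1,2,3,4,5,6,7,8,9,10,11,12,13,14,15,16,17,18,19,20,21,22,23,24,25,26,27,28,29,30] from by rfl]
  simp only [List.map_cons, List.map_nil, Function.comp_apply,
    show Int.toNat 30 = 30 from rfl, show Int.toNat 29 = 29 from rfl, show Int.toNat 18 = 18 from rfl,
    show Int.toNat 17 = 17 from rfl, show Int.toNat 16 = 16 from rfl, show Int.toNat 2 = 2 from rfl,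
    show Int.toNat 1 = 1 from rfl, show Int.toNat 0 = 0 from rfl]
  norm_num
  simp [Function.comp_def, List.map_const']

set_option maxHeartbeats 2000000 in
lemma case12 (src : List (List Int)) (M : Int) (h : src.length = 12) (hM : 31 ≤ M) :
    expand_embeddings src M = expand_embeddings_alt src M := by
  match src, h with
  | [a0,a1,a2,a3,a4,a5,a6,a7,a8,a9,a10,a11], _ =>
  simp only [expand_embeddings, expand_embeddings_alt]
  rw [if_neg (by simp : ¬ (([a0,a1,a2,a3,a4,a5,a6,a7,a8,a9,a10,a11] : List (List Int)).length : Int) = 8),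
      if_neg (by simp : ¬ (([a0,a1,a2,a3,a4,a5,a6,a7,a8,a9,a10,a11] : List (List Int)).length : Int) = 8),
      if_pos (by simp : (([a0,a1,a2,a3,a4,a5,a6,a7,a8,a9,a10,a11] : List (List Int)).length : Int) = 12),
      if_pos (by simp : (([a0,a1,a2,a3,a4,a5,a6,a7,a8,a9,a10,a11] : List (List Int)).length : Int) = 12)]
  rw [PySem.List.pyRange_one]
  simp only [sub_zero, zero_add]
  rw [show pvFill12 = [((0:Int),(0:Int)),(1,1),(2,2),(3,3),(4,4),(5,5),(6,6),(7,7),(8,8),(9,9),(10,29),(11,30)] from by decide]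
  simp only [List.foldl_cons, List.foldl_nil, pvZerosB]
  rw [      show PySem.List.pyGetD [a0,a1,a2,a3,a4,a5,a6,a7,a8,a9,a10,a11] (0:Int) [] = a0 from by simp [PySem.List.pyGetD, PySem.List.pyGet?, PySem.List.pyIdx?],
      show PySem.List.pyGetD [a0,a1,a2,a3,a4,a5,a6,a7,a8,a9,a10,a11] (1:Int) [] = a1 from by simp [PySem.List.pyGetD, PySem.List.pyGet?, PySem.List.pyIdx?],
      show PySem.List.pyGetD [a0,a1,a2,a3,a4,a5,a6,a7,a8,a9,a10,a11] (2:Int) [] = a2 from by simp [PySem.List.pyGetD, PySem.List.pyGet?, PySem.List.pyIdx?],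
      show PySem.List.pyGetD [a0,a1,a2,a3,a4,a5,a6,a7,a8,a9,a10,a11] (3:Int) [] = a3 from by simp [PySem.List.pyGetD, PySem.List.pyGet?, PySem.List.pyIdx?],
      show PySem.List.pyGetD [a0,a1,a2,a3,a4,a5,a6,a7,a8,a9,a10,a11] (4:Int) [] = a4 from by simp [PySem.List.pyGetD, PySem.List.pyGet?, PySem.List.pyIdx?],
      show PySem.List.pyGetD [a0,a1,a2,a3,a4,a5,a6,a7,a8,a9,a10,a11] (5:Int) [] = a5 from by simp [PySem.List.pyGetD, PySem.List.pyGet?, PySem.List.pyIdx?],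
      show PySem.List.pyGetD [a0,a1,a2,a3,a4,a5,a6,a7,a8,a9,a10,a11] (6:Int) [] = a6 from by simp [PySem.List.pyGetD, PySem.List.pyGet?, PySem.List.pyIdx?],
      show PySem.List.pyGetD [a0,a1,a2,a3,a4,a5,a6,a7,a8,a9,a10,a11] (7:Int) [] = a7 from by simp [PySem.List.pyGetD, PySem.List.pyGet?, PySem.List.pyIdx?],
      show PySem.List.pyGetD [a0,a1,a2,a3,a4,a5,a6,a7,a8,a9,a10,a11] (8:Int) [] = a8 from by simp [PySem.List.pyGetD, PySem.List.pyGet?, PySem.List.pyIdx?],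
      show PySem.List.pyGetD [a0,a1,a2,a3,a4,a5,a6,a7,a8,a9,a10,a11] (9:Int) [] = a9 from by simp [PySem.List.pyGetD, PySem.List.pyGet?, PySem.List.pyIdx?],
      show PySem.List.pyGetD [a0,a1,a2,a3,a4,a5,a6,a7,a8,a9,a10,a11] (10:Int) [] = a10 from by simp [PySem.List.pyGetD, PySem.List.pyGet?, PySem.List.pyIdx?],
      show PySem.List.pyGetD [a0,a1,a2,a3,a4,a5,a6,a7,a8,a9,a10,a11] (11:Int) [] = a11 from by simp [PySem.List.pyGetD, PySem.List.pyGet?, PySem.List.pyIdx?]]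
  set z : List Int := List.replicate a0.length (0:Int) with hz
  rw [List.map_map]
  simp only [    PySem.List.pySetD_of_nonneg _ _ (by norm_num : (0:Int) <= 0),
    PySem.List.pySetD_of_nonneg _ _ (by norm_num : (0:Int) <= 1),
    PySem.List.pySetD_of_nonneg _ _ (by norm_num : (0:Int) <= 2),
    PySem.List.pySetD_of_nonneg _ _ (by norm_num : (0:Int) <= 3),
    PySem.List.pySetD_of_nonneg _ _ (by norm_num : (0:Int) <= 4),
    PySem.List.pySetD_of_nonneg _ _ (by norm_num : (0:Int) <= 5),
    PySem.List.pySetD_of_nonneg _ _ (by norm_num : (0:Int) <= 6),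
    PySem.List.pySetD_of_nonneg _ _ (by norm_num : (0:Int) <= 7),
    PySem.List.pySetD_of_nonneg _ _ (by norm_num : (0:Int) <= 8),
    PySem.List.pySetD_of_nonneg _ _ (by norm_num : (0:Int) <= 9),
    PySem.List.pySetD_of_nonneg _ _ (by norm_num : (0:Int) <= 29),
    PySem.List.pySetD_of_nonneg _ _ (by norm_num : (0:Int) <= 30)]
  rw [set_map_range _ _ _ _ (by omega)]
  rw [set_map_range _ _ _ _ (by omega)]
  rw [set_map_range _ _ _ _ (by omega)]
  rw [set_map_range _ _ _ _ (by omega)]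
  rw [set_map_range _ _ _ _ (by omega)]
  rw [set_map_range _ _ _ _ (by omega)]
  rw [set_map_range _ _ _ _ (by omega)]
  rw [set_map_range _ _ _ _ (by omega)]
  rw [set_map_range _ _ _ _ (by omega)]
  rw [set_map_range _ _ _ _ (by omega)]
  rw [set_map_range _ _ _ _ (by omega)]
  rw [set_map_range _ _ _ _ (by omega)]
  rw [show PySem.List.slice [a0,a1,a2,a3,a4,a5,a6,a7,a8,a9,a10,a11] none (some 10) = [a0,a1,a2,a3,a4,a5,a6,a7,a8,a9] from by rw [PySem.List.slice_to]; rfl; norm_num,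
      show PySem.List.slice [a0,a1,a2,a3,a4,a5,a6,a7,a8,a9,a10,a11] (some 10) none = [a10,a11] from by rw [PySem.List.slice_from]; rfl; norm_num]
  rw [show PySem.List.pyRange 0 19 1 = (List.range 19).map (fun k : Nat => (k : Int)) from by rw [PySem.List.pyRange_one]; simp,
      show PySem.List.pyRange 0 (M-31) 1 = (List.range (M.toNat - 31)).map (fun k : Nat => (k : Int)) from by rw [PySem.List.pyRange_one, show (M-31-0).toNat = M.toNat - 31 from by omega]; simp]
  simp only [List.map_map]
  obtain ⟨m, hm⟩ : ∃ m, M.toNat = 31 + m := ⟨M.toNat - 31, by omega⟩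
  rw [hm, show 31 + m - 31 = m from by omega, List.range_add, List.map_append, List.map_map]
  have htail : (List.range m).map ((fun k : Nat =>
      if k = Int.toNat 30 then a11 else if k = Int.toNat 29 then a10 else if k = Int.toNat 9 then a9 else if k = Int.toNat 8 then a8 else if k = Int.toNat 7 then a7 else if k = Int.toNat 6 then a6 else if k = Int.toNat 5 then a5 else if k = Int.toNat 4 then a4 else if k = Int.toNat 3 then a3 else if k = Int.toNat 2 then a2 else if k = Int.toNat 1 then a1 else if k = Int.toNat 0 then a0 else ((fun _ : Int => z) ∘ fun k : Nat => (k : Int)) k) ∘ (fun k => 31 + k))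
      = (List.range m).map (fun _ => z) := by
    apply List.map_congr_left
    intro k _
    simp only [Function.comp_apply]
    rw [if_neg (by omega),
        if_neg (by omega),
        if_neg (by omega),
        if_neg (by omega),
        if_neg (by omega),
        if_neg (by omega),
        if_neg (by omega),
        if_neg (by omega),
        if_neg (by omega),
        if_neg (by omega),
        if_neg (by omega),
        if_neg (by omega)]
  rw [htail]
  rw [show List.range 31 = [0,1,2,3,4,5,6,7,8,9,10,11,12,13,14,15,16,17,18,19,20,21,22,23,24,25,26,27,28,29,30] from by rfl]
  simp only [List.map_cons, List.map_nil, Function.comp_apply,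
    show Int.toNat 30 = 30 from rfl, show Int.toNat 29 = 29 from rfl, show Int.toNat 9 = 9 from rfl, show Int.toNat 8 = 8 from rfl, show Int.toNat 7 = 7 from rfl, show Int.toNat 6 = 6 from rfl, show Int.toNat 5 = 5 from rfl, show Int.toNat 4 = 4 from rfl, show Int.toNat 3 = 3 from rfl, show Int.toNat 2 = 2 from rfl, show Int.toNat 1 = 1 from rfl, show Int.toNat 0 = 0 from rfl]
  norm_num
  simp [Function.comp_def, List.map_const']

-- ===== VERDICT (by name: the statement is the Claim_ definition above) =====
theorem expand_embeddings_spec : Claim_equal_expand_embeddings := by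
  intro src M _ hpre
  unfold Spec_expand_embeddings
  obtain ⟨hne, hlen⟩ := hpre
  by_cases h8 : src.length = 8
  · exact (case8 src M h8 (hlen (Or.inl h8)))
  · by_cases h12 : src.length = 12
    · exact (case12 src M h12 (hlen (Or.inr h12)))
    · exact (caseOther src M h8 h12)
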